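-- pv_equiv track=rewrite | github.com/the-harry-higgins/tourneydraft | app/api/utils.py | determineDraftId
-- ===== SOURCE A (Python) =====
-- def determineDraftId(drafts_data, draft_ids=None):
--     """
--     Check if any draft is currently drafting
--     Otherwise return most recent draft
--     """
--     if not draft_ids:
--         draft_ids = drafts_data.keys()
--
--     current_draft_id = None
--     max_year = 0
--     drafting = False
--     for draft_id in draft_ids:
--         if drafts_data[draft_id]['drafting']:
--             current_draft_id = draft_id
--             drafting = True
--             break
--         if drafts_data[draft_id]['year'] > max_year:
--             max_year = drafts_data[draft_id]['year']
--             current_draft_id = draft_id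
--
--     return current_draft_id, drafting
-- ===== SOURCE B (Python) =====
-- def determineDraftId(drafts_data, draft_ids=None):
--     ids = list(draft_ids) if draft_ids else list(drafts_data.keys())
--     # pass 1: first draft currently drafting
--     for draft_id in ids:
--         if drafts_data[draft_id]['drafting']:
--             return draft_id, True
--     # pass 2: most recent draft by year (first occurrence wins ties; year<=0 yields None)
--     current, max_year = None, 0
--     for draft_id in ids:
--         year = drafts_data[draft_id]['year']
--         if year > max_year:
--             current, max_year = draft_id, year
--     return current, False
-- ===== Notes on version B (the rewrite author's own statement) =====
-- stated objective: simpler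
-- what changed: Replaces A's single combined loop (break flag plus interleaved max-year tracking) by two sequential single-purpose passes: an early-return search for a drafting draft, then a plain max-by-year scan.
import Mathlib
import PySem

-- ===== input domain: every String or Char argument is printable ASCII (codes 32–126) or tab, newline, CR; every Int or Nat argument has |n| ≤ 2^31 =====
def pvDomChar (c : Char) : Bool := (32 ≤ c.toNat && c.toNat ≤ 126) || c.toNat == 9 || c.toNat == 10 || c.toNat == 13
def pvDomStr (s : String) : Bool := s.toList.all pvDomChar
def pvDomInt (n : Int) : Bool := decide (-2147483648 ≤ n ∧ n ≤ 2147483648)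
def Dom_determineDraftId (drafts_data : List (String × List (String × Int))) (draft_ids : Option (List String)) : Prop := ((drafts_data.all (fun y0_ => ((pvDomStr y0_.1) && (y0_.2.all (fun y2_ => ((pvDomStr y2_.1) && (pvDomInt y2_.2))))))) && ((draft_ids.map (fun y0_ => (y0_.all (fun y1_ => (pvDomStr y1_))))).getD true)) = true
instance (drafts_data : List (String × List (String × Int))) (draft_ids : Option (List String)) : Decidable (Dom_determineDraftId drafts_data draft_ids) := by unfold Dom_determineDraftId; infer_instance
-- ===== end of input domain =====

-- B rewrites A's single combined loop as two sequential single-purpose passes (simpler decomposition, same O(n) cost).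

-- shared access helpers (both Pythons read the dicts identically; exact under Pre_, which
-- guarantees the keys are present — in Python a missing key raises KeyError)
def pvEntry (dd : List (String × List (String × Int))) (i : String) : List (String × Int) :=
  (PySem.Dict.mk dd).getD i []
def pvField (d : List (String × Int)) (k : String) : Int :=
  (PySem.Dict.mk d).getD k 0
-- 'if not draft_ids: draft_ids = drafts_data.keys()' — keys in insertion order (exact under Pre_, which has unique keys)
def pvEffIds (dd : List (String × List (String × Int))) (dids : Option (List String)) : List String :=
  match dids with
  | some (i :: rest) => i :: rest
  | _ => dd.map (·.1)

-- ===== PORT A =====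
-- A's single loop: break-with-flag on a drafting draft, otherwise running max-year tracking
def detLoopA (dd : List (String × List (String × Int))) :
    List String → Option String → Int → Option String × Bool
  | [], cur, _ => (cur, false)
  | i :: rest, cur, maxY =>
    if pvField (pvEntry dd i) "drafting" ≠ 0 then (some i, true)
    else if pvField (pvEntry dd i) "year" > maxY then
      detLoopA dd rest (some i) (pvField (pvEntry dd i) "year")
    else detLoopA dd rest cur maxY

def determineDraftId (drafts_data : List (String × List (String × Int))) (draft_ids : Option (List String)) : Option String × Bool :=
  detLoopA drafts_data (pvEffIds drafts_data draft_ids) none 0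

-- ===== PORT B =====
-- pass 1: first draft currently drafting (early return)
def findDrafting (dd : List (String × List (String × Int))) : List String → Option String
  | [] => none
  | i :: rest =>
    if pvField (pvEntry dd i) "drafting" ≠ 0 then some i else findDrafting dd rest

-- pass 2: most recent draft by year, a plain fold
def bestByYear (dd : List (String × List (String × Int))) (ids : List String) : Option String :=
  (ids.foldl (fun (acc : Option String × Int) i =>
      let y := pvField (pvEntry dd i) "year"
      if y > acc.2 then (some i, y) else acc) (none, 0)).1

def determineDraftId_alt (drafts_data : List (String × List (String × Int))) (draft_ids : Option (List String)) : Option String × Bool :=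
  let ids := pvEffIds drafts_data draft_ids
  match findDrafting drafts_data ids with
  | some i => (some i, true)
  | none => (bestByYear drafts_data ids, false)

-- ===== PRECONDITION & SPEC =====
-- an id A's loop looks up must be a key of drafts_data whose dict has 'drafting' (and 'year' if not drafting)
def pvOkStep (dd : List (String × List (String × Int))) (i : String) : Prop :=
  (PySem.Dict.mk dd).contains i = true ∧
  ((pvEntry dd i).map Prod.fst).Nodup ∧
  (PySem.Dict.mk (pvEntry dd i)).contains "drafting" = true ∧
  (pvField (pvEntry dd i) "drafting" = 0 → (PySem.Dict.mk (pvEntry dd i)).contains "year" = true)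

-- Pre_ excludes inputs where Python's dict lookups raise KeyError (an id A's loop reaches that is not a
-- key of drafts_data, or a reached draft missing 'drafting'/'year'), and association lists with duplicate
-- keys, which cannot faithfully represent a Python dict (on real dict inputs it covers A's whole domain).
def Pre_determineDraftId (drafts_data : List (String × List (String × Int))) (draft_ids : Option (List String)) : Prop :=
  (drafts_data.map Prod.fst).Nodup ∧
  ∀ j ∈ List.range (pvEffIds drafts_data draft_ids).length,
    (∀ j' ∈ List.range j,
        pvOkStep drafts_data ((pvEffIds drafts_data draft_ids).getD j' "") ∧
        pvField (pvEntry drafts_data ((pvEffIds drafts_data draft_ids).getD j' "")) "drafting" = 0) →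
    pvOkStep drafts_data ((pvEffIds drafts_data draft_ids).getD j "")
instance (drafts_data : List (String × List (String × Int))) (draft_ids : Option (List String)) : Decidable (Pre_determineDraftId drafts_data draft_ids) := by unfold Pre_determineDraftId pvOkStep; infer_instance

def pvWitness_determineDraftId : (List (String × List (String × Int))) × Option (List String) :=
  ([("a", [("drafting", 0), ("year", 2020)]), ("b", [("drafting", 0), ("year", 2021)])], none)

def Spec_determineDraftId (drafts_data : List (String × List (String × Int))) (draft_ids : Option (List String)) (out : Option String × Bool) : Prop := out = determineDraftId_alt drafts_data draft_ids
instance (drafts_data : List (String × List (String × Int))) (draft_ids : Option (List String)) (out : Option String × Bool) : Decidable (Spec_determineDraftId drafts_data draft_ids out) := by unfold Spec_determineDraftId; infer_instance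

-- ===== CLAIM (what is proved, stated in full; the proofs are below) =====
def Claim_equal_determineDraftId : Prop := ∀ (drafts_data : List (String × List (String × Int))) (draft_ids : Option (List String)), Dom_determineDraftId drafts_data draft_ids → Pre_determineDraftId drafts_data draft_ids → Spec_determineDraftId drafts_data draft_ids (determineDraftId drafts_data draft_ids)

-- ===== LEMMAS AND PROOFS =====

-- A's combined loop splits into B's two passes, for any accumulator state
theorem detLoopA_split (dd : List (String × List (String × Int))) :
    ∀ (ids : List String) (cur : Option String) (maxY : Int),
      detLoopA dd ids cur maxY =
        match findDrafting dd ids with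
        | some i => (some i, true)
        | none =>
          ((ids.foldl (fun (acc : Option String × Int) i =>
              let y := pvField (pvEntry dd i) "year"
              if y > acc.2 then (some i, y) else acc) (cur, maxY)).1, false) := by
  intro ids
  induction ids with
  | nil => intro cur maxY; simp [detLoopA, findDrafting]
  | cons i rest ih =>
    intro cur maxY
    by_cases hd : pvField (pvEntry dd i) "drafting" ≠ 0
    · simp [detLoopA, findDrafting, hd]
    · by_cases hy : pvField (pvEntry dd i) "year" > maxY
      · simp [detLoopA, findDrafting, hd, hy, ih]
      · simp [detLoopA, findDrafting, hd, hy, ih]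

-- ===== VERDICT (by name: the statement is the Claim_ definition above) =====
theorem determineDraftId_spec : Claim_equal_determineDraftId := by
  intro dd dids _ _
  unfold Spec_determineDraftId determineDraftId determineDraftId_alt bestByYear
  rw [detLoopA_split]
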